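-- pv_equiv track=rewrite | github.com/mogartio/Algo1 | tp2-shapeshifter_chess/sschess.py | obtener_movimientos_disponibles
-- ===== SOURCE A (Python) =====
-- CANTIDAD_COL = 8
--
-- CANTIDAD_FILAS = 8
--
-- PIEZAS = ('caballo', 'alfil', 'torre')
--
-- def obtener_movimientos_disponibles(tablero, col, fila, pieza_actual, diccionario_movimientos):
--     """Se recibe la pieza inicial, junto a su posición, el tablero del nivel actual y el diccionario que contiene sus movimientos.
--     Se devuelve una lista de tuplas que contiene los casilleros del tablero (ocupados por otra pieza) a los que la pieza inicial podría moobtenerse """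
--
--     casillas_posibles = []
--     coordenadas_marcadas = []
--     for i in range(len(diccionario_movimientos[pieza_actual])):
--         nueva_coordenada = (fila + diccionario_movimientos[pieza_actual][i][1], col + diccionario_movimientos[pieza_actual][i][0])
--         casillas_posibles.append(nueva_coordenada)
--     for i in range(CANTIDAD_FILAS):
--         for j in range(CANTIDAD_COL):
--             if (i,j) in casillas_posibles and tablero[i][j] in PIEZAS:
--                 coordenadas_marcadas.append((i, j))
--     return coordenadas_marcadas
-- ===== SOURCE B (Python) =====
-- CANTIDAD_COL = 8
--
-- CANTIDAD_FILAS = 8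
--
-- PIEZAS = ('caballo', 'alfil', 'torre')
--
-- def obtener_movimientos_disponibles(tablero, col, fila, pieza_actual, diccionario_movimientos):
--     """Compute the target cells directly from the move offsets (as a set, so
--     duplicates collapse), keep the on-board ones occupied by a piece, and
--     return them sorted, i.e. in row-major order."""
--     objetivos = {(fila + dy, col + dx) for dx, dy in diccionario_movimientos[pieza_actual]}
--     ocupadas = {c for c in objetivos
--                 if 0 <= c[0] < CANTIDAD_FILAS and 0 <= c[1] < CANTIDAD_COL
--                 and tablero[c[0]][c[1]] in PIEZAS}
--     return sorted(ocupadas)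
-- ===== Notes on version B (the rewrite author's own statement) =====
-- stated objective: simpler
-- what changed: Instead of listing all candidate cells and then scanning every one of the 64 board cells against that list, B computes each target cell directly from its move offset, keeps the on-board occupied ones in a set (deduplicating), and returns them sorted into row-major order.
import Mathlib
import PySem

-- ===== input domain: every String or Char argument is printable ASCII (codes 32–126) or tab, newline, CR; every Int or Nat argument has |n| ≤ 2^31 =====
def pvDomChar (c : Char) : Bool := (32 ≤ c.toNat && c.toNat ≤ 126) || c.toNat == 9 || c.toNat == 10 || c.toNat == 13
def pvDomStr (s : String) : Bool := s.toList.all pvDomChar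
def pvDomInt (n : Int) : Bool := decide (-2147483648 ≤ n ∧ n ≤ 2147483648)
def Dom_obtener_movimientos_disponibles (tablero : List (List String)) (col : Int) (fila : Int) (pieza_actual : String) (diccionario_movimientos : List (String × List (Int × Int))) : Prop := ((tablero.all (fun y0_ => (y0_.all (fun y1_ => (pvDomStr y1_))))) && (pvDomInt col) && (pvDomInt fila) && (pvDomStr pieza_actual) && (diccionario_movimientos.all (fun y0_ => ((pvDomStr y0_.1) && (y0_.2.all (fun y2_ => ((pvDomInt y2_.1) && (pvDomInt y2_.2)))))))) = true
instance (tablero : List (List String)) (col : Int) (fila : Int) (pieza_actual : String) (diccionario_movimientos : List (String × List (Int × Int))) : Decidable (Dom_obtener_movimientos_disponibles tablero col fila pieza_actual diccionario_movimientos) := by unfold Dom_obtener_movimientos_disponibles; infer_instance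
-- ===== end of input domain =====

-- B computes each target cell directly from its move offset into a set and returns it sorted,
-- instead of A's scan of all 64 board cells against the candidate list (objective: simpler).

-- shared literal translation of the Python expression `tablero[i][j] in PIEZAS`
-- (returns false where Python would raise IndexError; Pre_ excludes those inputs)
def pvCelda (tablero : List (List String)) (i j : Int) : Bool :=
  match PySem.List.pyGet? tablero i with
  | none => false
  | some row =>
    match PySem.List.pyGet? row j with
    | none => false
    | some s => s == "caballo" || s == "alfil" || s == "torre"

-- ===== PORT A =====
def obtener_movimientos_disponibles (tablero : List (List String)) (col : Int) (fila : Int) (pieza_actual : String) (diccionario_movimientos : List (String × List (Int × Int))) : List (Int × Int) :=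
  match PySem.Dict.get? (PySem.Dict.mk diccionario_movimientos) pieza_actual with
  | none => []  -- Python raises KeyError here; excluded by Pre_
  | some moves =>
    let casillas_posibles : List (Int × Int) :=
      (PySem.List.pyRange 0 (moves.length : Int) 1).foldl
        (fun acc i =>
          acc ++ [(fila + (PySem.List.pyGetD moves i (0, 0)).2,
                   col + (PySem.List.pyGetD moves i (0, 0)).1)]) []
    (PySem.List.pyRange 0 8 1).foldl
      (fun acc i =>
        (PySem.List.pyRange 0 8 1).foldl
          (fun acc2 j =>
            if casillas_posibles.contains (i, j) && pvCelda tablero i j then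
              acc2 ++ [(i, j)]
            else acc2) acc) []

-- ===== PORT B =====
def obtener_movimientos_disponibles_alt (tablero : List (List String)) (col : Int) (fila : Int) (pieza_actual : String) (diccionario_movimientos : List (String × List (Int × Int))) : List (Int × Int) :=
  match PySem.Dict.get? (PySem.Dict.mk diccionario_movimientos) pieza_actual with
  | none => []  -- Python raises KeyError here; excluded by Pre_
  | some moves =>
    let objetivos : PySem.Set (Int × Int) :=
      PySem.Set.ofList (moves.map (fun m => (fila + m.2, col + m.1)))
    let ocupadas : PySem.Set (Int × Int) :=
      PySem.Set.ofList (objetivos.filter (fun c =>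
        decide (0 ≤ c.1) && decide (c.1 < 8) && decide (0 ≤ c.2) && decide (c.2 < 8) &&
        pvCelda tablero c.1 c.2))
    PySem.List.sorted2 ocupadas (fun c => c.1) (fun c => c.2)

-- ===== PRECONDITION & SPEC =====
-- Pre_ excludes exactly the inputs on which the Python A raises: a KeyError when pieza_actual
-- is not a key of diccionario_movimientos, and an IndexError when some target cell inside the
-- 8×8 range lies outside the actual tablero (row missing, or row shorter than the column).
def Pre_obtener_movimientos_disponibles (tablero : List (List String)) (col : Int) (fila : Int) (pieza_actual : String) (diccionario_movimientos : List (String × List (Int × Int))) : Prop :=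
  (PySem.Dict.get? (PySem.Dict.mk diccionario_movimientos) pieza_actual).isSome = true ∧
  ∀ m ∈ ((PySem.Dict.get? (PySem.Dict.mk diccionario_movimientos) pieza_actual).getD []),
    (0 ≤ fila + m.2 ∧ fila + m.2 < 8 ∧ 0 ≤ col + m.1 ∧ col + m.1 < 8) →
      ((fila + m.2).toNat < tablero.length ∧
       (col + m.1).toNat < (tablero.getD (fila + m.2).toNat []).length)
instance (tablero : List (List String)) (col : Int) (fila : Int) (pieza_actual : String) (diccionario_movimientos : List (String × List (Int × Int))) : Decidable (Pre_obtener_movimientos_disponibles tablero col fila pieza_actual diccionario_movimientos) := by unfold Pre_obtener_movimientos_disponibles; infer_instance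

def pvWitness_obtener_movimientos_disponibles : List (List String) × Int × Int × String × (List (String × List (Int × Int))) :=
  ([[".", "."], ["alfil"]], 0, 0, "torre", [("torre", [(0, 1)])])

def Spec_obtener_movimientos_disponibles (tablero : List (List String)) (col : Int) (fila : Int) (pieza_actual : String) (diccionario_movimientos : List (String × List (Int × Int))) (out : List (Int × Int)) : Prop := out = obtener_movimientos_disponibles_alt tablero col fila pieza_actual diccionario_movimientos
instance (tablero : List (List String)) (col : Int) (fila : Int) (pieza_actual : String) (diccionario_movimientos : List (String × List (Int × Int))) (out : List (Int × Int)) : Decidable (Spec_obtener_movimientos_disponibles tablero col fila pieza_actual diccionario_movimientos out) := by unfold Spec_obtener_movimientos_disponibles; infer_instance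

-- ===== CLAIM (what is proved, stated in full; the proofs are below) =====
def Claim_equal_obtener_movimientos_disponibles : Prop := ∀ (tablero : List (List String)) (col : Int) (fila : Int) (pieza_actual : String) (diccionario_movimientos : List (String × List (Int × Int))), Dom_obtener_movimientos_disponibles tablero col fila pieza_actual diccionario_movimientos → Pre_obtener_movimientos_disponibles tablero col fila pieza_actual diccionario_movimientos → Spec_obtener_movimientos_disponibles tablero col fila pieza_actual diccionario_movimientos (obtener_movimientos_disponibles tablero col fila pieza_actual diccionario_movimientos)

-- ===== LEMMAS AND PROOFS =====

-- the comparator sorted2 uses on (Int × Int) with keys fst and snd, and its reflexive negation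
def pvLtb (a b : Int × Int) : Bool :=
  decide (a.1 < b.1) || (!decide (b.1 < a.1) && decide (a.2 < b.2))

def pvR (a b : Int × Int) : Prop := pvLtb b a = false

theorem pvLtb_iff (a b : Int × Int) : pvLtb a b = true ↔ (a.1 < b.1 ∨ (a.1 = b.1 ∧ a.2 < b.2)) := by
  simp [pvLtb]; omega

theorem pvR_iff (a b : Int × Int) : pvR a b ↔ (a.1 < b.1 ∨ (a.1 = b.1 ∧ a.2 ≤ b.2)) := by
  simp [pvR, pvLtb]; omega

theorem pvR_of_ltb {a b : Int × Int} (h : pvLtb a b = true) : pvR a b := by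
  rw [pvLtb_iff] at h; rw [pvR_iff]; omega

theorem pvR_trans {a b c : Int × Int} (h1 : pvR a b) (h2 : pvR b c) : pvR a c := by
  rw [pvR_iff] at h1 h2 ⊢; omega

theorem pvR_antisymm {a b : Int × Int} (h1 : pvR a b) (h2 : pvR b a) : a = b := by
  rw [pvR_iff] at h1 h2
  exact Prod.ext (by omega) (by omega)

theorem pv_insertBy_perm (x : Int × Int) (l : List (Int × Int)) :
    (PySem.List.insertBy pvLtb x l).Perm (x :: l) := by
  induction l with
  | nil => simp [PySem.List.insertBy]
  | cons y ys ih =>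
    simp only [PySem.List.insertBy]
    split
    · exact List.Perm.refl _
    · exact ((ih.cons y).trans (List.Perm.swap x y ys))

theorem pv_insertBy_pairwise (x : Int × Int) (l : List (Int × Int))
    (h : l.Pairwise pvR) : (PySem.List.insertBy pvLtb x l).Pairwise pvR := by
  induction l with
  | nil => simp [PySem.List.insertBy]
  | cons y ys ih =>
    rcases List.pairwise_cons.mp h with ⟨hy, hys⟩
    simp only [PySem.List.insertBy]
    split
    · rename_i hlt
      refine List.pairwise_cons.mpr ⟨?_, h⟩
      intro z hz
      rcases List.mem_cons.mp hz with rfl | hz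
      · exact pvR_of_ltb hlt
      · exact pvR_trans (pvR_of_ltb hlt) (hy z hz)
    · rename_i hnlt
      refine List.pairwise_cons.mpr ⟨?_, ih hys⟩
      intro z hz
      rcases List.mem_cons.mp ((pv_insertBy_perm x ys).mem_iff.mp hz) with rfl | hz'
      · exact Bool.eq_false_iff.mpr hnlt
      · exact hy z hz'

theorem pv_foldl_ins (xs : List (Int × Int)) :
    ∀ acc : List (Int × Int), acc.Pairwise pvR →
      ((xs.foldl (fun a x => PySem.List.insertBy pvLtb x a) acc).Perm (acc ++ xs) ∧
       (xs.foldl (fun a x => PySem.List.insertBy pvLtb x a) acc).Pairwise pvR) := by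
  induction xs with
  | nil => intro acc h; simpa using h
  | cons x xs ih =>
    intro acc h
    have h1 := pv_insertBy_pairwise x acc h
    obtain ⟨hp, hpw⟩ := ih (PySem.List.insertBy pvLtb x acc) h1
    refine ⟨?_, hpw⟩
    simp only [List.foldl_cons]
    refine hp.trans ?_
    exact (((pv_insertBy_perm x acc).append_right xs).trans List.perm_middle.symm)

theorem pv_sorted2_eq_foldl (xs : List (Int × Int)) :
    PySem.List.sorted2 xs (fun c => c.1) (fun c => c.2) false =
      xs.foldl (fun a x => PySem.List.insertBy pvLtb x a) [] := rfl

-- sorted2 with keys fst/snd returns the unique pvLtb-increasing rearrangement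
theorem pv_sorted2_eq {xs L : List (Int × Int)} (hperm : L.Perm xs)
    (hL : L.Pairwise (fun a b => pvLtb a b = true)) :
    PySem.List.sorted2 xs (fun c => c.1) (fun c => c.2) false = L := by
  rw [pv_sorted2_eq_foldl]
  obtain ⟨hp, hpw⟩ := pv_foldl_ins xs [] (List.Pairwise.nil)
  simp only [List.nil_append] at hp
  refine List.Perm.eq_of_pairwise (le := pvR) (fun a b _ _ => pvR_antisymm) hpw
    (hL.imp pvR_of_ltb) (hp.trans hperm.symm)

-- ===== VERDICT (by name: the statement is the Claim_ definition above) =====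
theorem obtener_movimientos_disponibles_spec : Claim_equal_obtener_movimientos_disponibles := by
  intro tablero col fila pieza_actual diccionario_movimientos _hdom _hpre
  unfold Spec_obtener_movimientos_disponibles
  unfold obtener_movimientos_disponibles obtener_movimientos_disponibles_alt
  cases hget : PySem.Dict.get? (PySem.Dict.mk diccionario_movimientos) pieza_actual with
  | none => rfl
  | some moves =>
    simp only []
    -- the candidate/target list, identical on both sides
    set T : List (Int × Int) := moves.map (fun m => (fila + m.2, col + m.1)) with hT
    have hcas :
        (PySem.List.pyRange 0 (moves.length : Int) 1).foldl
          (fun acc i =>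
            acc ++ [(fila + (PySem.List.pyGetD moves i (0, 0)).2,
                     col + (PySem.List.pyGetD moves i (0, 0)).1)]) [] = T := by
      rw [PySem.List.foldl_pyRange_zero_pyGetD' moves (0, 0)
          (fun acc m => acc ++ [(fila + m.2, col + m.1)]) []]
      rw [PySem.List.foldl_append_singleton_eq_map]
      simp [hT]
    rw [hcas]
    -- A's double loop as a flatMap of filtered ranges
    set P : Int → Int → Bool := fun i j => T.contains (i, j) && pvCelda tablero i j with hP
    set G : Int → List (Int × Int) :=
      fun i => ((PySem.List.pyRange 0 8 1).filter (fun j => P i j)).map (fun j => (i, j)) with hG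
    have hA :
        (PySem.List.pyRange 0 8 1).foldl
          (fun acc i =>
            (PySem.List.pyRange 0 8 1).foldl
              (fun acc2 j => if P i j then acc2 ++ [(i, j)] else acc2) acc) [] =
        (PySem.List.pyRange 0 8 1).flatMap G := by
      have hbody : (fun (acc : List (Int × Int)) i =>
            (PySem.List.pyRange 0 8 1).foldl
              (fun acc2 j => if P i j then acc2 ++ [(i, j)] else acc2) acc) =
          fun acc i => acc ++ G i := by
        funext acc i
        exact PySem.List.foldl_append_if (P i) (fun j => (i, j)) _ acc
      rw [hbody, PySem.List.foldl_append_eq_flatMap]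
      simp
    rw [hA]
    -- B's pre-sort list
    set q : Int × Int → Bool := fun c =>
      decide (0 ≤ c.1) && decide (c.1 < 8) && decide (0 ≤ c.2) && decide (c.2 < 8) &&
      pvCelda tablero c.1 c.2 with hq
    set xs : List (Int × Int) := PySem.Set.ofList ((PySem.Set.ofList T).filter q) with hxs
    set L : List (Int × Int) := (PySem.List.pyRange 0 8 1).flatMap G with hL
    -- L is strictly increasing in the comparator
    have hLpw : L.Pairwise (fun a b => pvLtb a b = true) := by
      rw [hL, List.pairwise_flatMap]
      constructor
      · intro i _
        rw [hG]
        rw [List.pairwise_map]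
        refine ((PySem.List.pairwise_lt_pyRange_one 0 8).filter _).imp ?_
        intro j j' hjj'
        rw [pvLtb_iff]; right; exact ⟨rfl, hjj'⟩
      · refine (PySem.List.pairwise_lt_pyRange_one 0 8).imp ?_
        intro i i' hii' x hx y hy
        rw [hG] at hx hy
        rcases List.mem_map.mp hx with ⟨j, _, rfl⟩
        rcases List.mem_map.mp hy with ⟨j', _, rfl⟩
        rw [pvLtb_iff]; left; exact hii'
    have hLnd : L.Nodup := by
      haveI : Std.Irrefl (fun a b : Int × Int => pvLtb a b = true) := by
        constructor; intro a h; rw [pvLtb_iff] at h; omega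
      exact hLpw.nodup
    -- same elements
    have hmem : ∀ c : Int × Int, c ∈ L ↔ c ∈ xs := by
      rintro ⟨ci, cj⟩
      rw [hL, hxs]
      rw [PySem.Set.mem_ofList, List.mem_filter, PySem.Set.mem_ofList]
      simp only [List.mem_flatMap, hG, List.mem_map, List.mem_filter, hP, hq,
        PySem.List.mem_pyRange_one, Bool.and_eq_true, List.contains_iff_mem,
        decide_eq_true_eq, Prod.mk.injEq]
      aesop
    have hperm : L.Perm xs :=
      (List.perm_ext_iff_of_nodup hLnd (PySem.Set.nodup_ofList _)).mpr hmem
    exact (pv_sorted2_eq hperm hLpw).symm
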